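-- pv_equiv track=rewrite | github.com/bbi-lab/bbi-sciatac-demux | src/log_distiller.py | make_sample_process_ordered_dict
-- ===== SOURCE A (Python) =====
-- def make_sample_process_ordered_dict(sample_ordered_list, sample_process_runid_dict, process_order):
--   # Make a dictionary keyed by sample whose values are ordered
--   # lists of processes.
--   sample_process_ordered_dict = {}
--   for a_sample in sample_ordered_list:
--     a_process_dict = sample_process_runid_dict[a_sample]
--     process_ordered_list = []
--     process_flag_dict = dict.fromkeys(a_process_dict, 0)
--     for a_process in process_order:
--       if(a_process in process_flag_dict and process_flag_dict[a_process] == 0):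
--         process_ordered_list.append(a_process)
--         process_flag_dict[a_process] = 1
--     process_ordered_list_tmp = []
--     for a_process in process_flag_dict:
--       if(process_flag_dict[a_process] == 0):
--         process_ordered_list_tmp.append(a_process)
--     process_ordered_list = process_ordered_list + process_ordered_list_tmp
--     sample_process_ordered_dict[a_sample] = process_ordered_list
--   return(sample_process_ordered_dict)
-- ===== SOURCE B (Python) =====
-- def make_sample_process_ordered_dict(sample_ordered_list, sample_process_runid_dict, process_order):
--   # Rank table: first-occurrence index of each process in process_order;
--   # absent processes share sentinel rank n, so the stable sort keeps their
--   # dict insertion order after the ranked ones.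
--   rank = {}
--   for i, a_process in enumerate(process_order):
--     if a_process not in rank:
--       rank[a_process] = i
--   n = len(process_order)
--   sample_process_ordered_dict = {}
--   for a_sample in sample_ordered_list:
--     sample_process_ordered_dict[a_sample] = sorted(
--       sample_process_runid_dict[a_sample], key=lambda p: rank.get(p, n))
--   return sample_process_ordered_dict
-- ===== Notes on version B (the rewrite author's own statement) =====
-- stated objective: simpler
-- what changed: Replaces the per-sample flag-dict scan over process_order plus leftover pass with one precomputed first-occurrence rank table and a single stable sort of each sample's processes keyed by rank (absent processes share the sentinel rank len(process_order)).
import Mathlib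
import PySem

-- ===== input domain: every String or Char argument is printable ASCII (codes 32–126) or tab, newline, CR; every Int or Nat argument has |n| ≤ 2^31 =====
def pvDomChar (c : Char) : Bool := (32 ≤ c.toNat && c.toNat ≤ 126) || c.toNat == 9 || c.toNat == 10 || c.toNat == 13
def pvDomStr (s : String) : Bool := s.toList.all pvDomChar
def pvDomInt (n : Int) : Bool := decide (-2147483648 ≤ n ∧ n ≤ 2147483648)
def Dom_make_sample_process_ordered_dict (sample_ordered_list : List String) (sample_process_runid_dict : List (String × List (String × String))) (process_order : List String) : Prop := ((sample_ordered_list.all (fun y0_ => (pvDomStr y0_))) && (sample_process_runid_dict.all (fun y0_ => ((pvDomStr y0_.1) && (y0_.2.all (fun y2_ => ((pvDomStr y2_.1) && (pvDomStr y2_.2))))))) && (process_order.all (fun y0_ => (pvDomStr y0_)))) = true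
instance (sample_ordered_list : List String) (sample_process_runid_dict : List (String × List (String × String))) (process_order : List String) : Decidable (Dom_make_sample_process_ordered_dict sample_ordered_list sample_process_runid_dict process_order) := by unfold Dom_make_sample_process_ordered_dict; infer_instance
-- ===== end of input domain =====

-- B replaces A's per-sample flag-dict two-pass scan by one precomputed first-occurrence
-- rank table and a stable sort per sample (objective: simpler; not claimed faster).

-- ===== PORT A =====
-- literal transliteration of A: per sample, a flag dict over the sample's processes,
-- a pass over process_order appending unseen flagged-0 processes, then a pass over the
-- flag dict collecting the untouched ones.
def make_sample_process_ordered_dict (sample_ordered_list : List String) (sample_process_runid_dict : List (String × List (String × String))) (process_order : List String) : List (String × List String) :=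
  (sample_ordered_list.foldl (fun (d : PySem.Dict String (List String)) a_sample =>
    match (PySem.Dict.mk sample_process_runid_dict).get? a_sample with
    | none => d   -- KeyError in Python; excluded by Pre_
    | some a_process_dict =>
      -- process_flag_dict = dict.fromkeys(a_process_dict, 0): iterates the dict's keys
      let process_flag_dict : PySem.Dict String Int :=
        (PySem.List.dedup (a_process_dict.map Prod.fst)).foldl
          (fun f p => f.insert p 0) PySem.Dict.empty
      let st := process_order.foldl
        (fun (st : List String × PySem.Dict String Int) a_process =>
          if st.2.get? a_process = some 0 then (st.1 ++ [a_process], st.2.insert a_process 1)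
          else st)
        ([], process_flag_dict)
      let process_ordered_list_tmp := st.2.keys.foldl
        (fun acc a_process => if st.2.get? a_process = some 0 then acc ++ [a_process] else acc) []
      d.insert a_sample (st.1 ++ process_ordered_list_tmp))
    PySem.Dict.empty).items

-- ===== PORT B =====
-- literal transliteration of B: first-occurrence rank table over process_order, then
-- per sample a stable sort of the sample's (distinct) process keys by rank.
def make_sample_process_ordered_dict_alt (sample_ordered_list : List String) (sample_process_runid_dict : List (String × List (String × String))) (process_order : List String) : List (String × List String) :=
  let rank : PySem.Dict String Int :=
    (PySem.List.enumerate process_order).foldl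
      (fun d ip => if d.contains ip.2 then d else d.insert ip.2 ip.1) PySem.Dict.empty
  let n : Int := (process_order.length : Int)
  (sample_ordered_list.foldl (fun (d : PySem.Dict String (List String)) a_sample =>
    match (PySem.Dict.mk sample_process_runid_dict).get? a_sample with
    | none => d   -- KeyError in Python; excluded by Pre_
    | some a_process_dict =>
      d.insert a_sample
        (PySem.List.sorted (PySem.List.dedup (a_process_dict.map Prod.fst))
          (fun p => rank.getD p n)))
    PySem.Dict.empty).items

-- ===== PRECONDITION & SPEC =====
-- Pre_ excludes exactly the inputs where Python A raises KeyError: some sample of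
-- sample_ordered_list is not a key of sample_process_runid_dict.
def Pre_make_sample_process_ordered_dict (sample_ordered_list : List String) (sample_process_runid_dict : List (String × List (String × String))) (process_order : List String) : Prop :=
  ∀ s ∈ sample_ordered_list, s ∈ sample_process_runid_dict.map Prod.fst
instance (sample_ordered_list : List String) (sample_process_runid_dict : List (String × List (String × String))) (process_order : List String) : Decidable (Pre_make_sample_process_ordered_dict sample_ordered_list sample_process_runid_dict process_order) := by unfold Pre_make_sample_process_ordered_dict; infer_instance

def pvWitness_make_sample_process_ordered_dict : List String × (List (String × List (String × String))) × List String :=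
  (["s1", "s2"], [("s1", [("p2", "r1"), ("p9", "r2")]), ("s2", [("p1", "r3")])], ["p1", "p2", "p3"])

def Spec_make_sample_process_ordered_dict (sample_ordered_list : List String) (sample_process_runid_dict : List (String × List (String × String))) (process_order : List String) (out : List (String × List String)) : Prop := out = make_sample_process_ordered_dict_alt sample_ordered_list sample_process_runid_dict process_order
instance (sample_ordered_list : List String) (sample_process_runid_dict : List (String × List (String × String))) (process_order : List String) (out : List (String × List String)) : Decidable (Spec_make_sample_process_ordered_dict sample_ordered_list sample_process_runid_dict process_order out) := by unfold Spec_make_sample_process_ordered_dict; infer_instance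

-- ===== CLAIM (what is proved, stated in full; the proofs are below) =====
def Claim_equal_make_sample_process_ordered_dict : Prop := ∀ (sample_ordered_list : List String) (sample_process_runid_dict : List (String × List (String × String))) (process_order : List String), Dom_make_sample_process_ordered_dict sample_ordered_list sample_process_runid_dict process_order → Pre_make_sample_process_ordered_dict sample_ordered_list sample_process_runid_dict process_order → Spec_make_sample_process_ordered_dict sample_ordered_list sample_process_runid_dict process_order (make_sample_process_ordered_dict sample_ordered_list sample_process_runid_dict process_order)

-- ===== LEMMAS AND PROOFS =====

theorem rank_fold_get? (po : List String) : ∀ (s : Int) (d : PySem.Dict String Int) (p : String),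
    ((PySem.List.enumerate po s).foldl
      (fun d ip => if d.contains ip.2 then d else d.insert ip.2 ip.1) d).get? p =
    (if d.contains p then d.get? p else (PySem.List.index? po p).map (fun k : Nat => s + (k : Int))) := by
  induction po with
  | nil =>
    intro s d p
    simp only [PySem.List.enumerate, List.foldl_nil, PySem.List.index?_eq_idxOf?]
    by_cases hp : d.contains p = true
    · simp [hp]
    · simp only [hp, if_false]
      simp [List.idxOf?_eq_none_iff]
      exact (PySem.Dict.get?_eq_none_iff_contains d p).mpr (by simpa using hp)
  | cons q rest ih =>
    intro s d p
    rw [PySem.List.enumerate_cons]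
    simp only [List.foldl_cons]
    by_cases hq : d.contains q = true
    · simp only [hq, if_true]
      rw [ih]
      by_cases hp : d.contains p = true
      · simp [hp]
      · have hpq : p ≠ q := fun h => by rw [h, hq] at hp; exact hp rfl
        rw [PySem.List.index?_cons_of_ne _ hpq.symm]
        simp only [hp, if_false, Option.map_map]
        cases PySem.List.index? rest p with
        | none => rfl
        | some a => simp; push_cast; ring
    · simp only [hq, Bool.false_eq_true, if_false]
      rw [ih]
      by_cases hpq : p = q
      · subst hpq
        have hc : (d.insert p s).contains p = true := PySem.Dict.contains_insert_self d p s
        simp only [hc, if_true, PySem.Dict.get?_insert_self, hq, if_false,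
          PySem.List.index?_cons_self, Option.map_some, Int.natCast_zero, add_zero,
          Bool.false_eq_true]
      · rw [PySem.Dict.contains_insert, PySem.Dict.get?_insert_of_ne _ _ hpq]
        have hbe : (p == q) = false := by simpa using hpq
        rw [hbe, PySem.List.index?_cons_of_ne _ (fun h => hpq h.symm)]
        simp only [Bool.false_or]
        by_cases hp : d.contains p = true
        · simp [hp]
        · simp only [hp, if_false, Option.map_map]
          cases PySem.List.index? rest p with
          | none => rfl
          | some a => simp; push_cast; ring

def kf (po : List String) (p : String) : Int :=
  match PySem.List.index? po p with
  | some i => (i : Int)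
  | none => (po.length : Int)

theorem rank_getD (po : List String) (p : String) :
    ((PySem.List.enumerate po).foldl
      (fun d ip => if d.contains ip.2 then d else d.insert ip.2 ip.1)
      (PySem.Dict.empty : PySem.Dict String Int)).getD p ((po.length : Nat) : Int) = kf po p := by
  rw [PySem.Dict.getD_eq_get?_getD, rank_fold_get?]
  simp only [PySem.Dict.contains_empty, Bool.false_eq_true, if_false, kf]
  cases PySem.List.index? po p with
  | none => rfl
  | some i => simp

theorem set_foldl_add_from (xs : List String) : ∀ (s : List String),
    List.foldl PySem.Set.add s xs =
      s ++ (List.foldl PySem.Set.add ([] : List String) xs).filter (fun y => !(s.contains y)) := by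
  induction xs with
  | nil => intro s; simp
  | cons x xs ih =>
    intro s
    simp only [List.foldl_cons]
    have hadd0 : PySem.Set.add ([] : List String) x = [x] := by
      simp [PySem.Set.add, PySem.Set.contains]
    rw [hadd0, ih ([x]), ih (PySem.Set.add s x)]
    by_cases hx : s.contains x = true
    · have hxm : x ∈ s := by simpa using hx
      have hadd : PySem.Set.add s x = s := by simp [PySem.Set.add, PySem.Set.contains, hxm]
      rw [hadd]
      simp only [List.filter_append, List.filter_filter, List.append_assoc]
      congr 1
      have h1 : List.filter (fun y => !s.contains y) [x] = [] := by
        simp [List.filter_cons, hxm]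
      rw [h1, List.nil_append]
      apply List.filter_congr
      intro y _
      by_cases hyx : y = x
      · subst hyx; simp [hxm]
      · simp [List.contains_cons, hyx]
    · have hxm : x ∉ s := by simpa using hx
      have hadd : PySem.Set.add s x = s ++ [x] := by
        simp [PySem.Set.add, PySem.Set.contains, hxm]
      rw [hadd]
      simp only [List.filter_append, List.filter_filter, List.append_assoc]
      congr 1
      have h1 : List.filter (fun y => !s.contains y) [x] = [x] := by
        simp [List.filter_cons, hxm]
      rw [h1]
      congr 1
      apply List.filter_congr
      intro y _
      by_cases hyx : y = x
      · subst hyx; simp [List.contains_append]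
      · simp [List.contains_append, hyx]

theorem dedup_cons (q : String) (rest : List String) :
    PySem.List.dedup (q :: rest) = q :: (PySem.List.dedup rest).filter (fun y => y != q) := by
  rw [PySem.List.dedup_eq_ofList, PySem.List.dedup_eq_ofList]
  show List.foldl PySem.Set.add PySem.Set.empty (q :: rest) = _
  rw [List.foldl_cons]
  have hadd0 : PySem.Set.add PySem.Set.empty q = [q] := by
    simp [PySem.Set.add, PySem.Set.contains, PySem.Set.empty]
  rw [hadd0, set_foldl_add_from rest [q]]
  show q :: List.filter _ (List.foldl PySem.Set.add PySem.Set.empty rest) = _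
  congr 1
  apply List.filter_congr
  intro y _
  by_cases h : y = q <;> simp [h, bne]

theorem dedup_eq_self_of_nodup (xs : List String) (h : xs.Nodup) : PySem.List.dedup xs = xs := by
  induction xs with
  | nil => rfl
  | cons x xs ih =>
    rw [dedup_cons, ih (List.Nodup.of_cons h)]
    congr 1
    apply List.filter_eq_self.mpr
    intro y hy
    have : y ≠ x := by rintro rfl; exact (List.nodup_cons.mp h).1 hy
    simpa [bne] using this

theorem kf_le (po : List String) (p : String) : kf po p ≤ (po.length : Int) := by
  unfold kf
  cases h : PySem.List.index? po p with
  | none => simp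
  | some i =>
    obtain ⟨hk, _, _⟩ := PySem.List.getElem_of_index?_eq_some h
    show (i : Int) ≤ (po.length : Int)
    exact_mod_cast Nat.le_of_lt hk

theorem kf_lt_iff (po : List String) (p : String) : kf po p < (po.length : Int) ↔ p ∈ po := by
  unfold kf
  cases h : PySem.List.index? po p with
  | none =>
    simp only [lt_self_iff_false, false_iff]
    exact (PySem.List.index?_eq_none_iff po p).mp h
  | some i =>
    obtain ⟨hk, _, _⟩ := PySem.List.getElem_of_index?_eq_some h
    have hm : p ∈ po := by
      have := (PySem.List.index?_isSome_iff po p).mp (by rw [h]; rfl)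
      exact this
    have : (i : Int) < (po.length : Int) := by exact_mod_cast hk
    simpa [hm] using this

theorem kf_cons_self (q : String) (rest : List String) : kf (q :: rest) q = 0 := by
  unfold kf; rw [PySem.List.index?_cons_self]; rfl

theorem kf_cons_of_ne (q b : String) (rest : List String) (hbq : b ≠ q) (hbm : b ∈ rest) :
    kf (q :: rest) b = kf rest b + 1 := by
  unfold kf
  rw [PySem.List.index?_cons_of_ne rest (fun h => hbq h.symm)]
  cases hi : PySem.List.index? rest b with
  | none => exact absurd ((PySem.List.index?_eq_none_iff rest b).mp hi) (by simp [hbm])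
  | some i => show ((i + 1 : Nat) : Int) = (i : Int) + 1; push_cast; ring

theorem dedup_pairwise_kf (po : List String) :
    (PySem.List.dedup po).Pairwise (fun a b => kf po a < kf po b) := by
  induction po with
  | nil => simp [PySem.List.dedup, PySem.Set.ofList, PySem.Set.empty]
  | cons q rest ih =>
    rw [dedup_cons]
    constructor
    · intro b hb
      have hbq : b ≠ q := by simpa [bne] using List.of_mem_filter hb
      have hbm : b ∈ rest := (PySem.List.mem_dedup rest b).mp (List.mem_of_mem_filter hb)
      rw [kf_cons_self, kf_cons_of_ne q b rest hbq hbm]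
      have : 0 ≤ kf rest b := by
        unfold kf
        cases PySem.List.index? rest b with
        | none => positivity
        | some i => positivity
      omega
    · have h1 := ih.filter (fun y => y != q)
      have h2 := List.Pairwise.and_mem.mp h1
      refine h2.imp ?_
      rintro a b ⟨ha, hb, hab⟩
      have haq : a ≠ q := by simpa [bne] using List.of_mem_filter ha
      have hbq : b ≠ q := by simpa [bne] using List.of_mem_filter hb
      have ham : a ∈ rest := (PySem.List.mem_dedup rest a).mp (List.mem_of_mem_filter ha)
      have hbm : b ∈ rest := (PySem.List.mem_dedup rest b).mp (List.mem_of_mem_filter hb)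
      rw [kf_cons_of_ne q a rest haq ham, kf_cons_of_ne q b rest hbq hbm]
      omega

theorem fromkeys_get? (keys : List String) : ∀ (d : PySem.Dict String Int) (q : String),
    (keys.foldl (fun f p => f.insert p (0 : Int)) d).get? q =
      (if q ∈ keys then some 0 else d.get? q) := by
  induction keys with
  | nil => intro d q; simp
  | cons k rest ih =>
    intro d q
    rw [List.foldl_cons, ih]
    by_cases hq : q ∈ rest
    · simp [hq]
    · simp only [hq, if_false, List.mem_cons, or_false]
      by_cases hqk : q = k
      · subst hqk; simp [PySem.Dict.get?_insert_self]
      · simp [hqk, PySem.Dict.get?_insert_of_ne _ _ hqk]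

theorem loopA_fst (po : List String) : ∀ (acc : List String) (f : PySem.Dict String Int),
    (po.foldl (fun (st : List String × PySem.Dict String Int) p =>
        if st.2.get? p = some 0 then (st.1 ++ [p], st.2.insert p 1) else st) (acc, f)).1 =
      acc ++ (PySem.List.dedup po).filter (fun p => decide (f.get? p = some 0)) := by
  induction po with
  | nil => intro acc f; simp [PySem.List.dedup, PySem.Set.ofList, PySem.Set.empty]
  | cons p rest ih =>
    intro acc f
    rw [List.foldl_cons, dedup_cons]
    by_cases hp : f.get? p = some 0
    · rw [if_pos hp]
      simp only [List.filter_cons, decide_eq_true_eq, if_pos hp]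
      rw [ih, List.append_assoc, List.filter_filter]
      congr 1
      rw [List.singleton_append]
      congr 1
      apply List.filter_congr
      intro y _
      by_cases hyp : y = p
      · subst hyp; simp [PySem.Dict.get?_insert_self, bne]
      · simp [PySem.Dict.get?_insert_of_ne _ _ hyp, bne, hyp]
    · simp only [if_neg hp]
      rw [ih]
      congr 1
      simp only [List.filter_cons, decide_eq_true_eq, hp]
      rw [List.filter_filter]
      apply List.filter_congr
      intro y _
      by_cases hyp : y = p
      · subst hyp; simp [hp]
      · simp [bne, hyp]

theorem loopA_snd_get? (po : List String) : ∀ (acc : List String) (f : PySem.Dict String Int) (q : String),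
    (po.foldl (fun (st : List String × PySem.Dict String Int) p =>
        if st.2.get? p = some 0 then (st.1 ++ [p], st.2.insert p 1) else st) (acc, f)).2.get? q =
      (if q ∈ po ∧ f.get? q = some 0 then some 1 else f.get? q) := by
  induction po with
  | nil => intro acc f q; simp
  | cons p rest ih =>
    intro acc f q
    rw [List.foldl_cons]
    by_cases hp : f.get? p = some 0
    · rw [if_pos hp, ih]
      by_cases hqp : q = p
      · subst hqp
        simp [PySem.Dict.get?_insert_self, hp]
      · rw [PySem.Dict.get?_insert_of_ne _ _ hqp]
        simp [List.mem_cons, hqp]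
    · simp only [if_neg hp]
      rw [ih]
      by_cases hqp : q = p
      · subst hqp; simp [hp]
      · simp [List.mem_cons, hqp]

theorem loopA_snd_keys (po : List String) : ∀ (acc : List String) (f : PySem.Dict String Int),
    (po.foldl (fun (st : List String × PySem.Dict String Int) p =>
        if st.2.get? p = some 0 then (st.1 ++ [p], st.2.insert p 1) else st) (acc, f)).2.keys =
      f.keys := by
  induction po with
  | nil => intro acc f; rfl
  | cons p rest ih =>
    intro acc f
    rw [List.foldl_cons]
    by_cases hp : f.get? p = some 0
    · rw [if_pos hp, ih]
      apply PySem.Dict.keys_insert_of_contains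
      rw [PySem.Dict.contains_eq_isSome_get?, hp]; rfl
    · simp only [if_neg hp]
      exact ih acc f

theorem insertBy_append (before : String → String → Bool) (x : String) :
    ∀ (A B : List String), (∀ b ∈ B, before x b = true) →
    PySem.List.insertBy before x (A ++ B) = PySem.List.insertBy before x A ++ B := by
  intro A
  induction A with
  | nil =>
    intro B hB
    cases B with
    | nil => rfl
    | cons b B' =>
      simp [PySem.List.insertBy, hB b (by simp)]
  | cons a A' ih =>
    intro B hB
    by_cases ha : before x a = true
    · simp [PySem.List.insertBy, ha]
    · simp only [List.cons_append, PySem.List.insertBy, ha, Bool.false_eq_true, if_false]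
      rw [ih B hB]

theorem sorted_split_aux (key : String → Int) (n : Int) :
    ∀ (xs A B : List String), (∀ x ∈ xs, key x ≤ n) → (∀ a ∈ A, key a ≤ n) →
      (∀ b ∈ B, key b = n) →
    xs.foldl (fun acc x => PySem.List.insertBy (fun a b => decide (key a < key b)) x acc) (A ++ B) =
      (xs.filter (fun x => decide (key x < n))).foldl
        (fun acc x => PySem.List.insertBy (fun a b => decide (key a < key b)) x acc) A
      ++ B ++ xs.filter (fun x => decide (key x = n)) := by
  intro xs
  induction xs with
  | nil => intro A B _ _ _; simp
  | cons x xs ih =>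
    intro A B hxs hA hB
    rw [List.foldl_cons]
    rcases lt_or_eq_of_le (hxs x (by simp)) with hlt | heq
    · rw [insertBy_append _ _ A B (fun b hb => by simp [hB b hb, hlt])]
      rw [ih (PySem.List.insertBy _ x A) B (fun y hy => hxs y (by simp [hy]))
        (fun a ha => by
          rcases (PySem.List.mem_insertBy _ x a A).mp ha with rfl | ha'
          · exact le_of_lt hlt
          · exact hA a ha') hB]
      simp only [List.filter_cons, hlt, decide_true, if_true, List.foldl_cons,
        decide_eq_true_eq]
      rw [if_neg (by omega : ¬ key x = n)]
    · rw [PySem.List.insertBy_of_forall_not_before _ x (A ++ B) (fun y hy => by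
        simp only [decide_eq_false_iff_not, not_lt]
        rcases List.mem_append.mp hy with h | h
        · rw [heq]; exact hA y h
        · rw [heq, hB y h]), List.append_assoc]
      rw [ih A (B ++ [x]) (fun y hy => hxs y (by simp [hy])) hA
        (fun b hb => by
          rcases List.mem_append.mp hb with h | h
          · exact hB b h
          · simp at h; subst h; omega)]
      simp only [List.filter_cons, decide_eq_true_eq]
      rw [if_neg (by omega : ¬ key x < n), if_pos (by omega : key x = n)]
      simp [List.append_assoc]

theorem sorted_split (key : String → Int) (n : Int) (xs : List String)
    (h : ∀ x ∈ xs, key x ≤ n) :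
    PySem.List.sorted xs key =
      PySem.List.sorted (xs.filter (fun x => decide (key x < n))) key ++
        xs.filter (fun x => decide (key x = n)) := by
  rw [PySem.List.sorted_eq_foldl_insertBy, PySem.List.sorted_eq_foldl_insertBy]
  have := sorted_split_aux key n xs [] [] h (by simp) (by simp)
  simpa using this

theorem per_sample (po : List String) (pairs : List (String × String)) :
    ((po.foldl (fun (st : List String × PySem.Dict String Int) a_process =>
          if st.2.get? a_process = some 0 then (st.1 ++ [a_process], st.2.insert a_process 1)
          else st)
        ([], (PySem.List.dedup (pairs.map Prod.fst)).foldl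
          (fun f p => f.insert p 0) PySem.Dict.empty)).1 ++
     (po.foldl (fun (st : List String × PySem.Dict String Int) a_process =>
          if st.2.get? a_process = some 0 then (st.1 ++ [a_process], st.2.insert a_process 1)
          else st)
        ([], (PySem.List.dedup (pairs.map Prod.fst)).foldl
          (fun f p => f.insert p 0) PySem.Dict.empty)).2.keys.foldl
        (fun acc a_process =>
          if (po.foldl (fun (st : List String × PySem.Dict String Int) a_process =>
              if st.2.get? a_process = some 0 then (st.1 ++ [a_process], st.2.insert a_process 1)
              else st)
            ([], (PySem.List.dedup (pairs.map Prod.fst)).foldl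
              (fun f p => f.insert p 0) PySem.Dict.empty)).2.get? a_process = some 0
          then acc ++ [a_process] else acc) []) =
    PySem.List.sorted (PySem.List.dedup (pairs.map Prod.fst)) (fun p => kf po p) := by
  set keys := PySem.List.dedup (pairs.map Prod.fst) with hkeys
  have hk : keys.Nodup := PySem.List.nodup_dedup _
  set flags0 : PySem.Dict String Int := keys.foldl (fun f p => f.insert p 0) PySem.Dict.empty
    with hflags0def
  have hflags0 : ∀ q, flags0.get? q = (if q ∈ keys then some 0 else none) := by
    intro q
    rw [hflags0def, fromkeys_get?]
    simp [PySem.Dict.get?_empty]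
  set n : Int := (po.length : Int) with hn
  -- first component
  have h1 : (po.foldl (fun (st : List String × PySem.Dict String Int) a_process =>
        if st.2.get? a_process = some 0 then (st.1 ++ [a_process], st.2.insert a_process 1)
        else st) ([], flags0)).1 =
      (PySem.List.dedup po).filter (fun p => decide (p ∈ keys)) := by
    rw [loopA_fst]
    simp only [List.nil_append]
    apply List.filter_congr
    intro y _
    rw [hflags0 y]
    by_cases hy : y ∈ keys <;> simp [hy]
  -- final flag dict
  have h2 : ∀ q, (po.foldl (fun (st : List String × PySem.Dict String Int) a_process =>
        if st.2.get? a_process = some 0 then (st.1 ++ [a_process], st.2.insert a_process 1)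
        else st) ([], flags0)).2.get? q =
      (if q ∈ po ∧ q ∈ keys then some 1 else flags0.get? q) := by
    intro q
    rw [loopA_snd_get?]
    rw [hflags0 q]
    by_cases hqp : q ∈ po <;> by_cases hqk : q ∈ keys <;> simp [hqp, hqk]
  have h3 : (po.foldl (fun (st : List String × PySem.Dict String Int) a_process =>
        if st.2.get? a_process = some 0 then (st.1 ++ [a_process], st.2.insert a_process 1)
        else st) ([], flags0)).2.keys = keys := by
    rw [loopA_snd_keys]
    rw [hflags0def]
    rw [PySem.Dict.keys_foldl_insert keys (fun _ _ => (0 : Int)) PySem.Dict.empty]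
    show PySem.Set.update ([] : List String) keys = keys
    show List.foldl PySem.Set.add ([] : List String) keys = keys
    have hded : PySem.List.dedup keys = keys := dedup_eq_self_of_nodup keys hk
    rw [PySem.List.dedup_eq_ofList] at hded
    simpa [PySem.Set.ofList, PySem.Set.empty] using hded
  -- second component
  have h4 : ((po.foldl (fun (st : List String × PySem.Dict String Int) a_process =>
        if st.2.get? a_process = some 0 then (st.1 ++ [a_process], st.2.insert a_process 1)
        else st) ([], flags0)).2.keys.foldl
        (fun acc a_process =>
          if (po.foldl (fun (st : List String × PySem.Dict String Int) a_process =>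
              if st.2.get? a_process = some 0 then (st.1 ++ [a_process], st.2.insert a_process 1)
              else st) ([], flags0)).2.get? a_process = some 0
          then acc ++ [a_process] else acc) []) =
      keys.filter (fun p => decide (p ∉ po)) := by
    rw [PySem.List.foldl_append_ite_eq_filter, List.nil_append, h3]
    apply List.filter_congr
    intro y hy
    rw [h2 y, hflags0 y]
    by_cases hyp : y ∈ po <;> simp [hyp, hy]
  rw [h1, h4]
  -- B side
  rw [sorted_split (fun p => kf po p) n keys (fun x _ => kf_le po x)]
  congr 1
  · symm
    apply PySem.List.sorted_eq_of_perm_of_pairwise_lt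
    · rw [List.perm_ext_iff_of_nodup ((PySem.List.nodup_dedup po).filter _) (hk.filter _)]
      intro y
      simp only [List.mem_filter, PySem.List.mem_dedup, decide_eq_true_eq]
      constructor
      · rintro ⟨hypo, hyk⟩
        exact ⟨hyk, by rw [hn] at *; exact (kf_lt_iff po y).mpr hypo⟩
      · rintro ⟨hyk, hlt⟩
        exact ⟨(kf_lt_iff po y).mp hlt, hyk⟩
    · exact (dedup_pairwise_kf po).filter _
  · apply List.filter_congr
    intro y _
    have hle := kf_le po y
    by_cases hy : y ∈ po
    · have hlt := (kf_lt_iff po y).mpr hy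
      have hne : ¬ (kf po y = n) := by rw [hn]; omega
      simp [hy, hne]
    · have hnlt : ¬ kf po y < n := fun h => hy ((kf_lt_iff po y).mp (by rw [hn] at h; exact h))
      have heq : kf po y = n := by rw [hn] at *; omega
      simp [hy, heq]


-- ===== VERDICT (by name: the statement is the Claim_ definition above) =====
theorem make_sample_process_ordered_dict_spec : Claim_equal_make_sample_process_ordered_dict := by
  intro sample_ordered_list sample_process_runid_dict process_order _dom _pre
  unfold Spec_make_sample_process_ordered_dict
  unfold make_sample_process_ordered_dict make_sample_process_ordered_dict_alt
  refine congrArg PySem.Dict.items ?_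
  refine PySem.List.foldl_congr_mem _ _ _ _ ?_
  intro d s _
  cases hg : (PySem.Dict.mk sample_process_runid_dict).get? s with
  | none => rfl
  | some pairs =>
    show _ = d.insert s _
    refine congrArg (d.insert s) ?_
    have hfun : (fun p => ((PySem.List.enumerate process_order).foldl
        (fun d ip => if d.contains ip.2 then d else d.insert ip.2 ip.1)
        (PySem.Dict.empty : PySem.Dict String Int)).getD p ((process_order.length : Nat) : Int)) =
        (fun p => kf process_order p) := funext (rank_getD process_order)
    rw [hfun]
    exact per_sample process_order pairs
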